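-- pv_equiv track=rewrite | github.com/RonanMullins/UCC | Programming_and_Problem_Solving/Semester 2/Lab6/my_functions.py | difference_of_numbers
-- ===== SOURCE A (Python) =====
-- def difference_of_numbers(characters:str) -> str:
--     '''
--     Function which takes in a str of characters.
--     Formats the string, increases ord unicode of digits either side of a capital letter by 1.
--     Removes all letters.
--     It calculates the sum of numbers present minus the sum of the numbers missing in the inputted sequence.
--     It is assumed values inputted are strings.
--     It returns a string.
--     '''
--     try:
--
--         #error handling
--         if characters == True or characters == False:
--             raise Exception("Input must not be a boolean value!")
--         if type(characters) != str:
--             raise Exception("Input must be a str!")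
--
--         characters = characters.strip("\n") #remove returns
--         characters = characters.strip() #remove blanks spaces either ends
--         characters = characters.replace(" ","") #replace blank spaces with ""
--
--         #increase ord unicode left/right of a single capital letter
--         chars_list = list(characters)
--         for char in range(0, len(chars_list)): #go through every char in the list
--
--             if chars_list[char].isupper() and chars_list[char - 1].isdigit() and chars_list[char + 1].isdigit(): #is the char upper case? also left/right are digits?
--
--                 left_new_char = chr(ord(chars_list[char - 1]) + 1) # update the character by increasing ord() of the left character
--                 chars_list[char - 1] = left_new_char #assign the new character
--
--                 right_new_char = chr(ord(chars_list[char + 1]) + 1) # update the character by increasing ord() of the right character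
--                 chars_list[char + 1] = right_new_char #assign the new character
--
--         #list to str
--         char_str = ""
--         for char in chars_list:
--             char_str = char_str + str(char) #cycle through list and add values to a new str variable
--
--         #declare empty strings and lists
--         temp_string = ""
--         temp_list = []
--         num_list = []
--         for char in char_str: #go through every char in the str
--             if char.isdigit(): #is it a digit?
--                 temp_string = temp_string + char #add the digit to a temp string
--             else:
--                 temp_string = temp_string + " " #add this everytime there is no digit
--
--         temp_list = temp_string.split(" ") #now make a new list by splitting where the blank spaces are
--
--         for x in temp_list: #go through the temp list
--             if x != '': #theres no empty space? then add to the num list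
--                 x = int(x)
--                 num_list.append(x)
--
--         #check there's digits present and the list isn't empty
--         if not num_list:
--             raise Exception("No numbers in the sequence!")
--
--         num_list = list(dict.fromkeys(num_list)) #remove duplicate values
--         num_list.sort() #sort numbers
--         min_num = int(num_list[0]) #set min number
--         max_num = int(num_list[len(num_list)-1]) #set max number
--         missing_sum = 0 #set sum of missing numbers to 0
--         present_sum = 0 #set sum of present numbers to 0
--
--         for x in range(min_num, max_num + 1): #go through from min to max numbers
--
--             if x not in num_list: #if x isn't in the list then add it to the missing_sum tally
--                 missing_sum = missing_sum + x
--             else: # otherwise add to the present_sum tally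
--                 present_sum = present_sum + x
--
--         ret_val = present_sum - missing_sum #calculate the difference
--
--         return "Difference of numbers = " + str(ret_val) # return :)
--
--     except Exception as e:
--         return "difference_of_numbers() Problem! " + str(e)
-- ===== SOURCE B (Python) =====
-- def difference_of_numbers(characters: str) -> str:
--     '''
--     Same observable behaviour as the original, computed differently:
--     the digit runs are collected in one accumulator pass directly into a set
--     (no space-substitution string, no split(), no dedup-then-sort pass), and
--     the present-minus-missing total is computed in closed form
--     (2*sum(present) - arithmetic-series total) instead of scanning every
--     integer from min to max and testing membership.
--     '''
--     try:
--         s = characters.strip("\n").strip().replace(" ", "")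
--         chars = list(s)
--         # formatting step required by the spec: bump the digits on both sides of a capital
--         for i in range(len(chars)):
--             if chars[i].isupper() and chars[i - 1].isdigit() and chars[i + 1].isdigit():
--                 chars[i - 1] = chr(ord(chars[i - 1]) + 1)
--                 chars[i + 1] = chr(ord(chars[i + 1]) + 1)
--         nums = set()
--         run = ""
--         for c in chars:
--             if c.isdigit():
--                 run = run + c
--             else:
--                 if run != "":
--                     nums.add(int(run))
--                 run = ""
--         if run != "":
--             nums.add(int(run))
--         if not nums:
--             raise Exception("No numbers in the sequence!")
--         lo, hi = min(nums), max(nums)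
--         ret_val = 2 * sum(nums) - (lo + hi) * (hi - lo + 1) // 2
--         return "Difference of numbers = " + str(ret_val)
--     except Exception as e:
--         return "difference_of_numbers() Problem! " + str(e)
-- ===== Notes on version B (the rewrite author's own statement) =====
-- stated objective: faster
-- what changed: B parses the digit runs in one accumulator pass straight into a set (replacing the space-substitution string, split(), int-mapping, dict.fromkeys dedup and sort) and computes the present-minus-missing total in closed form as 2*sum(set) - (min+max)*(max-min+1)//2 instead of scanning every integer from min to max with a list-membership test.
import Mathlib
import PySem

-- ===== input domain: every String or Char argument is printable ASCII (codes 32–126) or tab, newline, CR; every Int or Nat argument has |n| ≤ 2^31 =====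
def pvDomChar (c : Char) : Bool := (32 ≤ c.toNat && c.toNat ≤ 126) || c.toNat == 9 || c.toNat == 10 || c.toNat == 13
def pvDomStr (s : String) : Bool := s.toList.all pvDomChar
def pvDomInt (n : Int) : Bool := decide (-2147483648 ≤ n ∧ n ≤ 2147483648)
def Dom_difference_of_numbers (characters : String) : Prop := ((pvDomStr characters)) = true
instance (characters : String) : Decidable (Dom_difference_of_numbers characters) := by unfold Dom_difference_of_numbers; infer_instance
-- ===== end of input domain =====

-- B replaces the min..max membership scan by a closed-form sum over the set of parsed runs
-- (one accumulator pass, no split/dedup/sort); the spec's capital-letter digit-bump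
-- formatting loop is textually identical in both sources and shared as pvBumpCaps.

-- ===== PORT A =====
-- chr(ord(c) + 1)
def pvIncr (c : Char) : Char := Char.ofNat (c.toNat + 1)

-- one iteration of the formatting loop; `none` = IndexError from chars_list[char + 1]
def pvBumpStep (st : Option (List Char)) (i : Nat) : Option (List Char) :=
  match st with
  | none => none
  | some cs =>
    if PySem.Chars.isupper (PySem.List.pyGetD cs (i : Int) ' ')
        && PySem.Chars.isdigit (PySem.List.pyGetD cs ((i : Int) - 1) ' ') then
      match PySem.List.pyGet? cs ((i : Int) + 1) with
      | none => none
      | some c =>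
        if PySem.Chars.isdigit c then
          let cs1 := PySem.List.pySetD cs ((i : Int) - 1)
                       (pvIncr (PySem.List.pyGetD cs ((i : Int) - 1) ' '))
          some (PySem.List.pySetD cs1 ((i : Int) + 1)
                       (pvIncr (PySem.List.pyGetD cs1 ((i : Int) + 1) ' ')))
        else some cs
    else some cs

-- `for char in range(0, len(chars_list)): …`  (both Python sources contain this loop verbatim)
def pvBumpCaps (cs : List Char) : Option (List Char) :=
  (List.range cs.length).foldl pvBumpStep (some cs)

def difference_of_numbers (characters : String) : String :=
  let s1 := PySem.Str.stripChars characters "\n"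
  let s2 := PySem.Str.strip s1
  let s3 := PySem.Str.replace s2 " " ""
  match pvBumpCaps s3.toList with
  | none => "difference_of_numbers() Problem! list index out of range"
  | some cl =>
    let char_str := cl.foldl (fun acc c => acc ++ [c]) ([] : List Char)
    let temp_string := char_str.foldl
        (fun ts c => if PySem.Chars.isdigit c then ts ++ [c] else ts ++ [' ']) ([] : List Char)
    let temp_list := PySem.Chars.splitOn temp_string [' ']
    let num_list := temp_list.foldl
        (fun acc x => if x ≠ [] then acc ++ [(PySem.Int.ofChars? x).getD 0] else acc) ([] : List Int)
    if num_list = [] then "difference_of_numbers() Problem! No numbers in the sequence!"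
    else
      let uniq := PySem.List.dedup num_list
      let sorted := PySem.List.sorted uniq (fun x => x)
      let min_num := PySem.List.pyGetD sorted 0 0
      let max_num := PySem.List.pyGetD sorted (PySem.List.len sorted - 1) 0
      let pm := (PySem.List.pyRange min_num (max_num + 1) 1).foldl
          (fun pm x => if x ∉ sorted then (pm.1, pm.2 + x) else (pm.1 + x, pm.2))
          (((0 : Int), (0 : Int)))
      "Difference of numbers = " ++ PySem.Int.toStr (pm.1 - pm.2)

-- ===== PORT B =====
def difference_of_numbers_alt (characters : String) : String :=
  let s1 := PySem.Str.stripChars characters "\n"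
  let s2 := PySem.Str.strip s1
  let s3 := PySem.Str.replace s2 " " ""
  match pvBumpCaps s3.toList with
  | none => "difference_of_numbers() Problem! list index out of range"
  | some cl =>
    let st := cl.foldl
        (fun (st : PySem.Set Int × List Char) c =>
          if PySem.Chars.isdigit c then (st.1, st.2 ++ [c])
          else (if st.2 ≠ [] then PySem.Set.add st.1 ((PySem.Int.ofChars? st.2).getD 0) else st.1, []))
        (PySem.Set.empty, ([] : List Char))
    let nums : PySem.Set Int :=
      if st.2 ≠ [] then PySem.Set.add st.1 ((PySem.Int.ofChars? st.2).getD 0) else st.1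
    if nums = [] then "difference_of_numbers() Problem! No numbers in the sequence!"
    else
      let lo := (PySem.List.min? nums (fun x => x)).getD 0
      let hi := (PySem.List.max? nums (fun x => x)).getD 0
      let ret := 2 * nums.sum - PySem.Int.floordiv ((lo + hi) * (hi - lo + 1)) 2
      "Difference of numbers = " ++ PySem.Int.toStr ret

-- ===== PRECONDITION & SPEC =====
def Spec_difference_of_numbers (characters : String) (out : String) : Prop := out = difference_of_numbers_alt characters
instance (characters : String) (out : String) : Decidable (Spec_difference_of_numbers characters out) := by unfold Spec_difference_of_numbers; infer_instance

-- ===== CLAIM (what is proved, stated in full; the proofs are below) =====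
def Claim_equal_difference_of_numbers : Prop := ∀ (characters : String), Dom_difference_of_numbers characters → Spec_difference_of_numbers characters (difference_of_numbers characters)

-- ===== LEMMAS AND PROOFS =====

def split1 : List Char → List Char → List (List Char)
  | [], cur => [cur.reverse]
  | c :: rest, cur => if c = ' ' then cur.reverse :: split1 rest [] else split1 rest (c :: cur)

theorem go_spec (fuel : Nat) (l cur : List Char) (acc : List (List Char)) (h : l.length < fuel) :
    PySem.Chars.splitOn.go [' '] fuel l cur acc = acc.reverse ++ split1 l cur := by
  induction fuel generalizing l cur acc with
  | zero => omega
  | succ n ih =>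
    cases l with
    | nil => rw [PySem.Chars.splitOn.go.eq_def]; simp [split1]
    | cons c rest =>
      rw [PySem.Chars.splitOn.go.eq_def]
      by_cases hc : c = ' '
      · subst hc
        simp only [List.isPrefixOf, BEq.rfl, Bool.true_and, if_pos]
        rw [ih _ _ _ (by simpa using Nat.lt_of_succ_lt_succ h)]
        simp [split1]
      · have hp : ([' '].isPrefixOf (c :: rest)) = false := by
          simp [List.isPrefixOf]; exact fun h' => (hc h'.symm).elim
        simp only [hp, Bool.false_eq_true, if_neg, not_false_iff]
        rw [ih _ _ _ (by simpa using Nat.lt_of_succ_lt_succ h)]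
        simp [split1, hc]

theorem splitOn_space (cs : List Char) :
    PySem.Chars.splitOn cs [' '] = split1 cs [] := by
  rw [PySem.Chars.splitOn, go_spec _ _ _ _ (by omega)]
  simp

def mapc (c : Char) : Char := if PySem.Chars.isdigit c then c else ' '
def toIntD (x : List Char) : Int := (PySem.Int.ofChars? x).getD 0
def valsList (cl : List Char) : List Int :=
  ((split1 (cl.map mapc) []).filter (· ≠ [])).map toIntD

def bStep (st : PySem.Set Int × List Char) (c : Char) : PySem.Set Int × List Char :=
  if PySem.Chars.isdigit c then (st.1, st.2 ++ [c])
  else (if st.2 ≠ [] then PySem.Set.add st.1 ((PySem.Int.ofChars? st.2).getD 0) else st.1, [])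

theorem scan_spec (cl : List Char) (s : PySem.Set Int) (run : List Char) :
    (let st := cl.foldl bStep (s, run);
     if st.2 ≠ [] then PySem.Set.add st.1 ((PySem.Int.ofChars? st.2).getD 0) else st.1)
    = PySem.Set.update s
        (((split1 (cl.map mapc) run.reverse).filter (· ≠ [])).map toIntD) := by
  induction cl generalizing s run with
  | nil =>
    by_cases hr : run = []
    · subst hr; simp [split1, PySem.Set.update_nil]
    · simp only [List.foldl_nil, List.map_nil, split1, List.reverse_reverse]
      rw [List.filter_cons_of_pos (by simpa using hr)]
      simp [hr, toIntD, PySem.Set.update_cons, PySem.Set.update_nil]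
  | cons c t ih =>
    by_cases hd : PySem.Chars.isdigit c
    · simp only [List.foldl_cons, bStep, hd, if_pos, List.map_cons, mapc]
      have hcs : c ≠ ' ' := by
        intro h; subst h; simp [PySem.Chars.isdigit] at hd
      rw [split1]
      simp only [hcs, ite_false]
      have := ih s (run ++ [c])
      simpa [List.reverse_append] using this
    · have hsp : mapc c = ' ' := by simp [mapc, hd]
      have hb : bStep (s, run) c = (if run ≠ [] then PySem.Set.add s (toIntD run) else s, []) := by
        simp [bStep, hd, toIntD]
      simp only [List.foldl_cons, List.map_cons, hsp, hb]
      rw [split1]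
      simp only [if_true, List.reverse_reverse]
      by_cases hr : run = []
      · subst hr
        rw [List.filter_cons_of_neg (by simp)]
        simpa using ih s []
      · rw [List.filter_cons_of_pos (by simpa using hr)]
        simp only [List.map_cons, PySem.Set.update_cons]
        rw [if_pos hr]
        simpa using ih (PySem.Set.add s (toIntD run)) []

theorem sum_filter_split (l : List Int) (p : Int → Bool) :
    (l.filter p).sum + (l.filter (fun x => !p x)).sum = l.sum := by
  induction l with
  | nil => simp
  | cons a t ih => by_cases h : p a <;> simp [h] <;> omega

theorem le_getLast_of_pairwise (l : List Int) (h : l.Pairwise (·≤·)) (x : Int)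
    (hx : x ∈ l) (hne : l ≠ []) : x ≤ l.getLast hne := by
  induction l with
  | nil => cases hx
  | cons a t ih =>
    rw [List.pairwise_cons] at h
    cases t with
    | nil => simp at hx; simp [hx]
    | cons b u =>
      rw [List.getLast_cons (by simp)]
      rcases List.mem_cons.mp hx with rfl | hx'
      · exact h.1 _ (List.getLast_mem (by simp))
      · exact ih h.2 hx' (by simp)

theorem head_le_of_pairwise (a : Int) (t : List Int) (h : (a :: t).Pairwise (·≤·)) (x : Int)
    (hx : x ∈ a :: t) : a ≤ x := by
  rw [List.pairwise_cons] at h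
  rcases List.mem_cons.mp hx with rfl | hx'
  · exact le_refl x
  · exact h.1 _ hx'

theorem sum_pyRange_two (lo hi : Int) (h : lo ≤ hi) :
    (PySem.List.pyRange lo (hi + 1) 1).sum * 2 = (lo + hi) * (hi - lo + 1) := by
  obtain ⟨n, rfl⟩ : ∃ n : Nat, hi = lo + n := ⟨(hi - lo).toNat, by omega⟩
  clear h
  induction n with
  | zero => rw [show lo + (0:Nat) + 1 = lo + 1 by norm_num, PySem.List.pyRange_one_singleton]
            simp; ring
  | succ m ih =>
    rw [show lo + ((m:Nat)+1:Nat) + 1 = (lo + m + 1) + 1 by push_cast; ring,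
        PySem.List.pyRange_one_succ_right (by omega)]
    rw [List.sum_append]
    push_cast
    push_cast at ih
    simp only [List.sum_cons, List.sum_nil]
    nlinarith [ih]

theorem valcore_aux (N : List Int) (a : Int) (t : List Int)
    (hperm : (a :: t).Perm N) (hSnd : (a :: t).Nodup) (hpw : (a :: t).Pairwise (·≤·)) :
    (let S := a :: t;
     let lo := PySem.List.pyGetD S 0 0;
     let hi := PySem.List.pyGetD S (PySem.List.len S - 1) 0;
     let pm := (PySem.List.pyRange lo (hi + 1) 1).foldl
        (fun pm x => if x ∉ S then (pm.1, pm.2 + x) else (pm.1 + x, pm.2)) (((0:Int), (0:Int)));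
     pm.1 - pm.2)
    = 2 * N.sum -
      PySem.Int.floordiv
        ((((PySem.List.min? N (fun x => x)).getD 0) + ((PySem.List.max? N (fun x => x)).getD 0)) *
          (((PySem.List.max? N (fun x => x)).getD 0) - ((PySem.List.min? N (fun x => x)).getD 0) + 1)) 2 := by
  have hSne : (a :: t) ≠ [] := by simp
  have hlo : PySem.List.pyGetD (a :: t) 0 0 = a := PySem.List.pyGetD_zero_cons a t 0
  -- the last element
  set L := (a :: t).getLast hSne with hL
  have hlen : PySem.List.len (a :: t) - 1 = (((a :: t).length - 1 : Nat) : Int) := by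
    rw [PySem.List.len_eq]; push_cast [List.length_cons]; ring
  have hhi : PySem.List.pyGetD (a :: t) (PySem.List.len (a :: t) - 1) 0 = L := by
    rw [hlen, PySem.List.pyGetD_natCast,
        List.getD_eq_getElem ((a :: t)) 0 (by simp),
        hL, List.getLast_eq_getElem]
    rfl
  -- bounds
  have hmem_lo : ∀ x ∈ a :: t, a ≤ x := head_le_of_pairwise a t hpw
  have hmem_hi : ∀ x ∈ a :: t, x ≤ L := fun x hx => le_getLast_of_pairwise _ hpw x hx hSne
  have hah : a ≤ L := hmem_lo _ (List.getLast_mem hSne)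
  -- min? and max? of N are a and L
  have hminN : (PySem.List.min? N (fun x => x)).getD 0 = a := by
    cases hm : PySem.List.min? N (fun x => x) with
    | none => rw [PySem.List.min?_eq_none_iff] at hm; subst hm; exact absurd hperm.eq_nil (by simp)
    | some m =>
      have hm1 : m ∈ N := PySem.List.min?_mem hm
      have hm2 := PySem.List.min?_isMin hm
      have : a ≤ m := hmem_lo m (hperm.mem_iff.mpr hm1)
      have : m ≤ a := hm2 a (hperm.mem_iff.mp (by simp))
      simp; omega
  have hmaxN : (PySem.List.max? N (fun x => x)).getD 0 = L := by
    cases hm : PySem.List.max? N (fun x => x) with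
    | none => rw [PySem.List.max?_eq_none_iff] at hm; subst hm; exact absurd hperm.eq_nil (by simp)
    | some m =>
      have hm1 : m ∈ N := PySem.List.max?_mem hm
      have hm2 := PySem.List.max?_isMax hm
      have h1 : m ≤ L := hmem_hi m (hperm.mem_iff.mpr hm1)
      have h2 : L ≤ m := hm2 L (hperm.mem_iff.mp (List.getLast_mem hSne))
      simp; omega
  -- reduce the lets
  simp only [hlo, hhi, hminN, hmaxN]
  -- split the two accumulators
  have hstep : (fun (pm : Int × Int) (x : Int) =>
        if x ∉ (a :: t) then (pm.1, pm.2 + x) else (pm.1 + x, pm.2))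
      = (fun pm x => ((fun (p : Int) (x : Int) => if x ∈ (a :: t) then p + x else p) pm.1 x,
                      (fun (q : Int) (x : Int) => if x ∉ (a :: t) then q + x else q) pm.2 x)) := by
    funext pm x
    by_cases h : x ∈ a :: t <;> simp [h]
  rw [hstep, PySem.List.foldl_prod_mk (f := fun (p : Int) (x : Int) => if x ∈ a :: t then p + x else p)
        (g := fun (q : Int) (x : Int) => if x ∉ a :: t then q + x else q)]
  rw [PySem.List.foldl_ite_eq_foldl_filter, PySem.List.foldl_ite_eq_foldl_filter]
  have hsum1 : ∀ (l : List Int), l.foldl (fun p x => p + x) (0 : Int) = l.sum := by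
    intro l
    simpa using PySem.List.foldl_add (g := fun x : Int => x) (l := l) (a := 0)
  rw [hsum1, hsum1]
  set R := PySem.List.pyRange a (L + 1) 1 with hR
  -- present sum is the sum of N
  have hpres : (R.filter (fun x => decide (x ∈ a :: t))).sum = N.sum := by
    apply List.Perm.sum_eq
    apply List.Perm.trans _ hperm
    apply (List.perm_ext_iff_of_nodup (List.Nodup.filter _ (by rw [hR]; exact PySem.List.nodup_pyRange_one a (L+1))) hSnd).mpr
    intro x
    simp only [List.mem_filter, decide_eq_true_eq, hR, PySem.List.mem_pyRange_one]
    constructor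
    · exact fun h => h.2
    · intro hx
      exact ⟨⟨hmem_lo x hx, by have := hmem_hi x hx; omega⟩, hx⟩
  -- missing sum is total minus present
  have hsplit := sum_filter_split R (fun x => decide (x ∈ a :: t))
  have hflt : R.filter (fun x => decide (x ∉ a :: t)) = R.filter (fun x => !(decide (x ∈ a :: t))) := by
    apply List.filter_congr
    intro x _
    simp [decide_not]
  rw [hflt]
  -- total of the range in closed form
  have htot2 : R.sum * 2 = (a + L) * (L - a + 1) := by rw [hR]; exact sum_pyRange_two a L hah
  have hfd : PySem.Int.floordiv ((a + L) * (L - a + 1)) 2 = R.sum := by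
    rw [← htot2, PySem.Int.floordiv_eq_ediv_of_pos (by omega)]
    exact Int.mul_ediv_cancel _ (by omega)
  rw [hfd, hpres]
  omega

theorem ofList_nil_iff (xs : List Int) : PySem.Set.ofList xs = [] ↔ xs = [] := by
  cases xs with
  | nil => simp
  | cons x t => rw [PySem.Set.ofList_cons]; simp

theorem AB_eq (characters : String) :
    difference_of_numbers characters = difference_of_numbers_alt characters := by
  unfold difference_of_numbers difference_of_numbers_alt
  simp only []
  cases hb : pvBumpCaps (PySem.Str.replace (PySem.Str.strip (PySem.Str.stripChars characters "\n")) " " "").toList with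
  | none => rfl
  | some cl =>
    dsimp only
    -- A-side pipeline in closed form
    have hchar : cl.foldl (fun acc c => acc ++ [c]) ([] : List Char) = cl := by
      simpa using PySem.List.foldl_append_singleton_eq_self (l := cl) (acc := [])
    have hmap : (fun (ts : List Char) c => if PySem.Chars.isdigit c then ts ++ [c] else ts ++ [' '])
        = fun ts c => ts ++ [mapc c] := by
      funext ts c
      by_cases h : PySem.Chars.isdigit c <;> simp [mapc, h]
    have htemp : cl.foldl (fun (ts : List Char) c => if PySem.Chars.isdigit c then ts ++ [c] else ts ++ [' ']) []
        = cl.map mapc := by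
      rw [hmap]
      simpa using PySem.List.foldl_append_singleton_eq_map (f := mapc) (l := cl) (acc := [])
    have hnum : (PySem.Chars.splitOn (cl.map mapc) [' ']).foldl
          (fun acc x => if x ≠ [] then acc ++ [(PySem.Int.ofChars? x).getD 0] else acc) ([] : List Int)
        = valsList cl := by
      rw [splitOn_space]
      simpa [valsList, toIntD] using
        PySem.List.foldl_append_ite (p := fun x : List Char => x ≠ [])
          (f := fun x => (PySem.Int.ofChars? x).getD 0)
          (l := split1 (cl.map mapc) []) (acc := [])
    -- B-side scan in closed form
    have hbs : (fun (st : PySem.Set Int × List Char) c =>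
          if PySem.Chars.isdigit c then (st.1, st.2 ++ [c])
          else (if st.2 ≠ [] then PySem.Set.add st.1 ((PySem.Int.ofChars? st.2).getD 0) else st.1, []))
        = bStep := rfl
    have hscan : (if (cl.foldl bStep (PySem.Set.empty, ([] : List Char))).2 ≠ [] then
          PySem.Set.add (cl.foldl bStep (PySem.Set.empty, ([] : List Char))).1
            ((PySem.Int.ofChars? (cl.foldl bStep (PySem.Set.empty, ([] : List Char))).2).getD 0)
        else (cl.foldl bStep (PySem.Set.empty, ([] : List Char))).1)
        = PySem.Set.ofList (valsList cl) := by
      have h := scan_spec cl PySem.Set.empty []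
      simp only [] at h
      rw [h, show (PySem.Set.empty : PySem.Set Int) = ([] : List Int) from rfl,
          PySem.Set.update_nil_left]
      rfl
    rw [hchar, htemp, hnum, hbs, hscan]
    by_cases hnil : valsList cl = []
    · rw [if_pos hnil, if_pos ((ofList_nil_iff _).mpr hnil)]
    · rw [if_neg hnil, if_neg (fun h => hnil ((ofList_nil_iff _).mp h))]
      set N := PySem.Set.ofList (valsList cl) with hN
      have hNnd : N.Nodup := PySem.Set.nodup_ofList _
      have hNne : N ≠ [] := fun h => hnil ((ofList_nil_iff _).mp h)
      have hdd : PySem.List.dedup (valsList cl) = N := rfl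
      rw [hdd]
      cases hcs : PySem.List.sorted N (fun x => x) with
      | nil =>
        exact absurd ((PySem.List.sorted_eq_nil_iff _ _ _).mp hcs) hNne
      | cons a t =>
        have hperm : (a :: t).Perm N := hcs ▸ PySem.List.sorted_perm N _ _
        have hpw : (a :: t).Pairwise (·≤·) := by
          have := PySem.List.sorted_pairwise N (fun x => x)
          rw [hcs] at this
          simpa using this
        have := valcore_aux N a t hperm (hperm.nodup_iff.mpr hNnd) hpw
        simp only [] at this
        rw [this]

-- ===== VERDICT (by name: the statement is the Claim_ definition above) =====
theorem difference_of_numbers_spec : Claim_equal_difference_of_numbers := by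
  intro characters _
  show difference_of_numbers characters = difference_of_numbers_alt characters
  exact AB_eq characters
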